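-- pv_equiv track=rewrite | github.com/choo0618/TIL | algoritm/20상반기 코딩테스트/.Line 코딩테스트/1.py | solution
-- ===== SOURCE A (Python) =====
-- def solution(inputString):
--     answer = 0
--
--     Dic={'(':0,'{':0,'[':0,'<':0}
--     for c in inputString:
--         if not c in '(){}[]<>':continue
--         if c in '({[<':Dic[c]+=1;continue
--         if c==')':
--             if not Dic['(']:return -1
--             Dic['(']-=1
--         elif c=='}':
--             if not Dic['{']:return -1
--             Dic['{']-=1
--         elif c==']':
--             if not Dic['[']:return -1
--             Dic['[']-=1
--         elif c=='>':
--             if not Dic['<']:return -1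
--             Dic['<']-=1
--         answer+=1
--
--     return answer
-- ===== SOURCE B (Python) =====
-- def solution(inputString):
--     answer = 0
--     for o, c in (('(', ')'), ('{', '}'), ('[', ']'), ('<', '>')):
--         bal = 0
--         for ch in inputString:
--             if ch == o:
--                 bal += 1
--             elif ch == c:
--                 if bal == 0:
--                     return -1
--                 bal -= 1
--                 answer += 1
--     return answer
-- ===== Notes on version B (the rewrite author's own statement) =====
-- stated objective: alternative
-- what changed: Replaces A's single combined pass with a four-counter dict by four independent per-bracket-type scans, each maintaining one balance counter and adding matched closes to a shared answer.
import Mathlib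
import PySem

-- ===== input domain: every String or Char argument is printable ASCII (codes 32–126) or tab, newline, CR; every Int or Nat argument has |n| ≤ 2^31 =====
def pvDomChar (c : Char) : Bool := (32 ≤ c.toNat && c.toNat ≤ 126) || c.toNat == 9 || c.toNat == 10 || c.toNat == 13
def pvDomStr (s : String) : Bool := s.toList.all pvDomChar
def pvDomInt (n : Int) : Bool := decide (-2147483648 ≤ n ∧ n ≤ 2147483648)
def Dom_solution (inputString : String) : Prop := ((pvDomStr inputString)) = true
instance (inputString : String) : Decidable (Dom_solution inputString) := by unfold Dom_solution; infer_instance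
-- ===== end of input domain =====

-- B replaces A's single combined pass (dict of four counters) by four independent
-- per-bracket-type scans with one balance counter each; same cost, different decomposition.

-- ===== PORT A =====
-- one combined left-to-right pass; p b s a are Dic['('], Dic['{'], Dic['['], Dic['<']
def runA : List Char → Int → Int → Int → Int → Int → Int
  | [], _, _, _, _, ans => ans
  | c :: rest, p, b, s, a, ans =>
    if c = '(' then runA rest (p + 1) b s a ans
    else if c = '{' then runA rest p (b + 1) s a ans
    else if c = '[' then runA rest p b (s + 1) a ans
    else if c = '<' then runA rest p b s (a + 1) ans
    else if c = ')' then (if p = 0 then -1 else runA rest (p - 1) b s a (ans + 1))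
    else if c = '}' then (if b = 0 then -1 else runA rest p (b - 1) s a (ans + 1))
    else if c = ']' then (if s = 0 then -1 else runA rest p b (s - 1) a (ans + 1))
    else if c = '>' then (if a = 0 then -1 else runA rest p b s (a - 1) (ans + 1))
    else runA rest p b s a ans

def solution (inputString : String) : Int :=
  runA inputString.toList 0 0 0 0 0

-- ===== PORT B =====
-- one scan for a single (open, close) pair; `none` = the early `return -1`,
-- `some ans` = the shared answer after this pass
def passB (o c : Char) : List Char → Int → Int → Option Int
  | [], _, ans => some ans
  | ch :: rest, bal, ans =>
    if ch = o then passB o c rest (bal + 1) ans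
    else if ch = c then (if bal = 0 then none else passB o c rest (bal - 1) (ans + 1))
    else passB o c rest bal ans

def solution_alt (inputString : String) : Int :=
  match passB '(' ')' inputString.toList 0 0 with
  | none => -1
  | some a1 =>
    match passB '{' '}' inputString.toList 0 a1 with
    | none => -1
    | some a2 =>
      match passB '[' ']' inputString.toList 0 a2 with
      | none => -1
      | some a3 =>
        match passB '<' '>' inputString.toList 0 a3 with
        | none => -1
        | some a4 => a4

-- ===== PRECONDITION & SPEC =====
def Spec_solution (inputString : String) (out : Int) : Prop := out = solution_alt inputString
instance (inputString : String) (out : Int) : Decidable (Spec_solution inputString out) := by unfold Spec_solution; infer_instance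

-- ===== CLAIM (what is proved, stated in full; the proofs are below) =====
def Claim_equal_solution : Prop := ∀ (inputString : String), Dom_solution inputString → Spec_solution inputString (solution inputString)

-- ===== LEMMAS AND PROOFS =====

-- A's combined pass equals the four independent passes run together.
lemma runA_eq (xs : List Char) : ∀ (p b s a ap ab as' aa ans : Int),
    runA xs p b s a ans =
      match passB '(' ')' xs p ap, passB '{' '}' xs b ab,
            passB '[' ']' xs s as', passB '<' '>' xs a aa with
      | some w, some x, some y, some z =>
          ans + (w - ap) + (x - ab) + (y - as') + (z - aa)
      | _, _, _, _ => -1 := by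
  induction xs with
  | nil => intro p b s a ap ab as' aa ans; simp [runA, passB]
  | cons ch rest ih =>
    intro p b s a ap ab as' aa ans
    by_cases h1 : ch = '('
    · subst h1; simp [runA, passB]; exact ih (p + 1) b s a ap ab as' aa ans
    by_cases h2 : ch = '{'
    · subst h2; simp [runA, passB]; exact ih p (b + 1) s a ap ab as' aa ans
    by_cases h3 : ch = '['
    · subst h3; simp [runA, passB]; exact ih p b (s + 1) a ap ab as' aa ans
    by_cases h4 : ch = '<'
    · subst h4; simp [runA, passB]; exact ih p b s (a + 1) ap ab as' aa ans
    by_cases h5 : ch = ')'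
    · subst h5
      by_cases hp : p = 0
      · simp [runA, passB, hp]
      · simp [runA, passB, hp]
        rw [ih (p - 1) b s a (ap + 1) ab as' aa (ans + 1)]
        cases passB '(' ')' rest (p - 1) (ap + 1) <;>
          cases passB '{' '}' rest b ab <;>
          cases passB '[' ']' rest s as' <;>
          cases passB '<' '>' rest a aa <;> simp <;> ring
    by_cases h6 : ch = '}'
    · subst h6
      by_cases hp : b = 0
      · simp [runA, passB, hp]
      · simp [runA, passB, hp]
        rw [ih p (b - 1) s a ap (ab + 1) as' aa (ans + 1)]
        cases passB '(' ')' rest p ap <;>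
          cases passB '{' '}' rest (b - 1) (ab + 1) <;>
          cases passB '[' ']' rest s as' <;>
          cases passB '<' '>' rest a aa <;> simp <;> ring
    by_cases h7 : ch = ']'
    · subst h7
      by_cases hp : s = 0
      · simp [runA, passB, hp]
      · simp [runA, passB, hp]
        rw [ih p b (s - 1) a ap ab (as' + 1) aa (ans + 1)]
        cases passB '(' ')' rest p ap <;>
          cases passB '{' '}' rest b ab <;>
          cases passB '[' ']' rest (s - 1) (as' + 1) <;>
          cases passB '<' '>' rest a aa <;> simp <;> ring
    by_cases h8 : ch = '>'
    · subst h8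
      by_cases hp : a = 0
      · simp [runA, passB, hp]
      · simp [runA, passB, hp]
        rw [ih p b s (a - 1) ap ab as' (aa + 1) (ans + 1)]
        cases passB '(' ')' rest p ap <;>
          cases passB '{' '}' rest b ab <;>
          cases passB '[' ']' rest s as' <;>
          cases passB '<' '>' rest (a - 1) (aa + 1) <;> simp <;> ring
    · simp [runA, passB, h1, h2, h3, h4, h5, h6, h7, h8]
      exact ih p b s a ap ab as' aa ans

-- shifting the shared-answer accumulator of a pass
lemma passB_shift (o c : Char) (xs : List Char) : ∀ (bal ans d : Int),
    passB o c xs bal (ans + d) = (passB o c xs bal ans).map (· + d) := by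
  induction xs with
  | nil => intro bal ans d; simp [passB]
  | cons ch rest ih =>
    intro bal ans d
    by_cases h1 : ch = o
    · simp [passB, h1]; exact ih (bal + 1) ans d
    by_cases h2 : ch = c
    · have hco : ¬ c = o := h2 ▸ h1
      by_cases hb : bal = 0
      · simp [passB, h2, hco, hb]
      · simp [passB, h2, hco, hb]
        rw [show ans + d + 1 = (ans + 1) + d by ring, ih]
    · simp [passB, h1, h2]; exact ih bal ans d

-- B's threaded shared answer equals the sum of the four independent pass counts
lemma alt_eq (s : String) :
    solution_alt s =
      match passB '(' ')' s.toList 0 0, passB '{' '}' s.toList 0 0,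
            passB '[' ']' s.toList 0 0, passB '<' '>' s.toList 0 0 with
      | some w, some x, some y, some z => w + x + y + z
      | _, _, _, _ => -1 := by
  have sh : ∀ (o c : Char) (d : Int), passB o c s.toList 0 d = (passB o c s.toList 0 0).map (· + d) :=
    fun o c d => by simpa using passB_shift o c s.toList 0 0 d
  unfold solution_alt
  cases hw : passB '(' ')' s.toList 0 0 with
  | none => rfl
  | some w =>
    simp only [sh '{' '}' w]
    cases hx : passB '{' '}' s.toList 0 0 with
    | none => simp
    | some x =>
      simp only [Option.map_some]
      simp only [sh '[' ']' (x + w)]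
      cases hy : passB '[' ']' s.toList 0 0 with
      | none => simp
      | some y =>
        simp only [Option.map_some]
        simp only [sh '<' '>' (y + (x + w))]
        cases hz : passB '<' '>' s.toList 0 0 with
        | none => simp
        | some z => simp; ring

-- ===== VERDICT (by name: the statement is the Claim_ definition above) =====
theorem solution_spec : Claim_equal_solution := by
  intro s _
  unfold Spec_solution solution
  rw [alt_eq, runA_eq s.toList 0 0 0 0 0 0 0 0 0]
  cases passB '(' ')' s.toList 0 0 <;>
    cases passB '{' '}' s.toList 0 0 <;>
    cases passB '[' ']' s.toList 0 0 <;>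
    cases passB '<' '>' s.toList 0 0 <;> simp [Int.add_comm]
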